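-- pv_equiv track=rewrite | github.com/KalibrateBlockchain/VFO2 | version_1/processing.py | uttToSpk
-- ===== SOURCE A (Python) =====
-- def uttToSpk(all_files):
--     '''
--     {utt: spk, ...}
--     '''
--     res = {}
--     unique_id = {}
--     curr = 0
--     for fullname in all_files:
--         f = fullname.split('/')[-1]#[:-1]
--         spk_id = f.split('_')[1]
--         if spk_id not in unique_id:
--             unique_id[spk_id] = curr
--             curr += 1
--         res[fullname] = spk_id
--     return res, unique_id
-- ===== SOURCE B (Python) =====
-- def uttToSpk(all_files):
--     spks = [f.split('/')[-1].split('_')[1] for f in all_files]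
--     unique_id = {s: r for r, s in enumerate(sorted(set(spks), key=spks.index))}
--     return dict(zip(all_files, spks)), unique_id
-- ===== Notes on version B (the rewrite author's own statement) =====
-- stated objective: alternative
-- what changed: Replaces A's streaming counter with per-item membership tests by a set+sort numbering: speakers are deduplicated with set() and ordered by sorting them on their first-occurrence index (spks.index), so no counter or ordered-scan dedup is maintained.
import Mathlib
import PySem

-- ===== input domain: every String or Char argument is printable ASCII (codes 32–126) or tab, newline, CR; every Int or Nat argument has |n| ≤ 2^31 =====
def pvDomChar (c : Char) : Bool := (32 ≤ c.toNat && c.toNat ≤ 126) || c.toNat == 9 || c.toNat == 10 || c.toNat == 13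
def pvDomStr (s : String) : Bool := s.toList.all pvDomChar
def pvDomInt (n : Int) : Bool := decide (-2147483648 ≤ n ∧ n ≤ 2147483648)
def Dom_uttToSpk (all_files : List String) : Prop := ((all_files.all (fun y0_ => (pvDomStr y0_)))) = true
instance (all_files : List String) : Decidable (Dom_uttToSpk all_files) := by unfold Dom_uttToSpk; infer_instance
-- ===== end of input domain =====

-- B replaces A's streaming counter + membership test by a set-and-sort numbering: dedup the
-- speaker ids with set() and order them by sorting on their first-occurrence index (spks.index).

-- shared transliteration of `fullname.split('/')[-1]` (split? with a nonempty sep is some nonempty list, so `[-1]` never raises)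
def pyBase (fullname : String) : String :=
  (PySem.List.pyGet? ((PySem.Str.split? fullname "/").getD []) (-1)).getD ""
-- `.split('_')` of the basename
def pyParts (fullname : String) : List String :=
  (PySem.Str.split? (pyBase fullname) "_").getD []
-- `fullname.split('/')[-1].split('_')[1]`; the `.getD ""` default is the IndexError case, excluded by Pre_
def pySpk (fullname : String) : String :=
  (PySem.List.pyGet? (pyParts fullname) 1).getD ""

-- ===== PORT A =====
-- the body of A's for-loop over (res, unique_id, curr)
def stepA (st : PySem.Dict String String × PySem.Dict String Int × Int) (fullname : String) :
    PySem.Dict String String × PySem.Dict String Int × Int :=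
  let spk_id := pySpk fullname
  let (uid, curr) :=
    if st.2.1.contains spk_id then (st.2.1, st.2.2)
    else (st.2.1.insert spk_id st.2.2, st.2.2 + 1)
  (st.1.insert fullname spk_id, uid, curr)

def uttToSpk (all_files : List String) : (List (String × String)) × (List (String × Int)) :=
  let st := all_files.foldl stepA (PySem.Dict.empty, PySem.Dict.empty, 0)
  (st.1.items, st.2.1.items)

-- ===== PORT B =====
-- `spks.index s` (never raises for s ∈ spks; Pre_-independent total form via getD)
def pyIdxKey (spks : List String) (s : String) : Nat :=
  (PySem.List.index? spks s).getD 0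

def uttToSpk_alt (all_files : List String) : (List (String × String)) × (List (String × Int)) :=
  let spks := all_files.map pySpk
  -- {s: r for r, s in enumerate(sorted(set(spks), key=spks.index))}
  let unique_id := (PySem.List.enumerate
      (PySem.List.sorted (PySem.Set.ofList spks) (pyIdxKey spks))).foldl
    (fun d p => d.insert p.2 p.1) PySem.Dict.empty
  -- dict(zip(all_files, spks))
  let res := (all_files.zip spks).foldl (fun d p => d.insert p.1 p.2) PySem.Dict.empty
  (res.items, unique_id.items)

-- ===== PRECONDITION & SPEC =====
-- Pre_ excludes exactly the inputs where A raises IndexError: a file whose basename has no '_' ('.split('_')' gives < 2 parts)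
def Pre_uttToSpk (all_files : List String) : Prop :=
  ∀ f ∈ all_files, 2 ≤ (pyParts f).length
instance (all_files : List String) : Decidable (Pre_uttToSpk all_files) := by unfold Pre_uttToSpk; infer_instance
def pvWitness_uttToSpk : List String := ["dir/a_s1_x", "b_s2", "dir/c_s1"]

def Spec_uttToSpk (all_files : List String) (out : (List (String × String)) × (List (String × Int))) : Prop := out = uttToSpk_alt all_files
instance (all_files : List String) (out : (List (String × String)) × (List (String × Int))) : Decidable (Spec_uttToSpk all_files out) := by unfold Spec_uttToSpk; infer_instance

-- ===== CLAIM (what is proved, stated in full; the proofs are below) =====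
def Claim_equal_uttToSpk : Prop := ∀ (all_files : List String), Dom_uttToSpk all_files → Pre_uttToSpk all_files → Spec_uttToSpk all_files (uttToSpk all_files)

-- ===== LEMMAS AND PROOFS =====

-- the unique_id dict built from an ordered list of speakers
def uidFrom (seen : List String) : PySem.Dict String Int :=
  (PySem.List.enumerate seen).foldl (fun d p => d.insert p.2 p.1) PySem.Dict.empty

lemma uidFrom_contains (seen : List String) (hnd : seen.Nodup) (s : String) :
    (uidFrom seen).contains s = seen.contains s := by
  rw [uidFrom, PySem.Dict.contains_eq_decide_mem_keys,
      PySem.Dict.keys_foldl_insert_key (PySem.List.enumerate seen) (fun p => p.2) (fun _ p => p.1)]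
  simp [PySem.List.map_snd_enumerate, PySem.Set.update, ← PySem.Set.ofList_eq_foldl,
        PySem.Set.ofList_eq_self_of_nodup seen hnd]

lemma uidFrom_snoc (seen : List String) (s : String) :
    (uidFrom seen).insert s (seen.length : Int) = uidFrom (seen ++ [s]) := by
  rw [uidFrom, uidFrom, PySem.List.enumerate_append, List.foldl_append]
  simp [PySem.List.enumerate]

lemma stepA_mem (res : PySem.Dict String String) (seen : List String) (hnd : seen.Nodup)
    (x : String) (h : seen.contains (pySpk x) = true) :
    stepA (res, uidFrom seen, (seen.length : Int)) x
      = (res.insert x (pySpk x), uidFrom seen, (seen.length : Int)) := by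
  have hm : (uidFrom seen).contains (pySpk x) = true := by rw [uidFrom_contains seen hnd]; exact h
  simp [stepA, hm]

lemma stepA_new (res : PySem.Dict String String) (seen : List String) (hnd : seen.Nodup)
    (x : String) (h : seen.contains (pySpk x) = false) :
    stepA (res, uidFrom seen, (seen.length : Int)) x
      = (res.insert x (pySpk x), uidFrom (seen ++ [pySpk x]), (((seen ++ [pySpk x]).length : Nat) : Int)) := by
  have hm : (uidFrom seen).contains (pySpk x) = false := by rw [uidFrom_contains seen hnd]; exact h
  simp [stepA, hm, ← uidFrom_snoc]

-- A's loop invariant: state = (res so far, numbering of first-seen speakers, their count)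
lemma loopA (l : List String) (res : PySem.Dict String String) (seen : List String)
    (hnd : seen.Nodup) :
    l.foldl stepA (res, uidFrom seen, (seen.length : Int)) =
    (l.foldl (fun d f => d.insert f (pySpk f)) res,
     uidFrom (PySem.Set.update seen (l.map pySpk)),
     ((PySem.Set.update seen (l.map pySpk)).length : Int)) := by
  induction l generalizing res seen with
  | nil => simp [PySem.Set.update]
  | cons x t ih =>
    have hupd : PySem.Set.update seen (pySpk x :: t.map pySpk)
        = PySem.Set.update (PySem.Set.add seen (pySpk x)) (t.map pySpk) := rfl
    rw [List.foldl_cons]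
    by_cases h : seen.contains (pySpk x) = true
    · have hadd : PySem.Set.add seen (pySpk x) = seen := by
        rw [PySem.Set.add, if_pos (by rw [PySem.Set.contains_eq_listContains]; exact h)]
      rw [stepA_mem res seen hnd x h, ih (res.insert x (pySpk x)) seen hnd]
      simp [hupd, hadd]
    · have h' : seen.contains (pySpk x) = false := by simpa using h
      have hmem : pySpk x ∉ seen := by simpa using h'
      have hadd : PySem.Set.add seen (pySpk x) = seen ++ [pySpk x] := by
        rw [PySem.Set.add, if_neg (by rw [PySem.Set.contains_eq_listContains, h']; simp)]
      rw [stepA_new res seen hnd x h',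
          ih (res.insert x (pySpk x)) (seen ++ [pySpk x])
            (hnd.append (List.nodup_singleton _) (by simpa [List.disjoint_singleton] using hmem))]
      simp [hupd, hadd]

-- B's res-fold over zip(all_files, spks) is A's res-fold
lemma res_zip (l : List String) (d : PySem.Dict String String) :
    (l.zip (l.map pySpk)).foldl (fun d p => d.insert p.1 p.2) d
      = l.foldl (fun d f => d.insert f (pySpk f)) d := by
  induction l generalizing d with
  | nil => rfl
  | cons x t ih => simp only [List.map_cons, List.zip_cons_cons, List.foldl_cons]; exact ih _

-- first-occurrence indices are strictly increasing along set(xs)'s insertion order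
lemma ofList_pairwise_idx (xs : List String) :
    (PySem.Set.ofList xs).Pairwise (fun a b => pyIdxKey xs a < pyIdxKey xs b) := by
  induction xs using List.reverseRecOn with
  | nil => simp [PySem.Set.ofList]
  | append_singleton t y ih =>
    have hof : PySem.Set.ofList (t ++ [y]) = PySem.Set.add (PySem.Set.ofList t) y := by
      rw [PySem.Set.ofList_eq_foldl, List.foldl_append, ← PySem.Set.ofList_eq_foldl]
      rfl
    have hkey : ∀ a ∈ PySem.Set.ofList t, pyIdxKey (t ++ [y]) a = pyIdxKey t a := by
      intro a ha
      have : a ∈ t := (PySem.Set.mem_ofList _ _).mp ha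
      rw [pyIdxKey, pyIdxKey, PySem.List.index?_append_of_mem [y] this]
    by_cases hy : y ∈ t
    · rw [hof, PySem.Set.add_of_mem ((PySem.Set.mem_ofList _ _).mpr hy)]
      exact ih.imp_of_mem (fun ha hb h => by rw [hkey _ ha, hkey _ hb]; exact h)
    · rw [hof, PySem.Set.add_of_not_mem (fun h => hy ((PySem.Set.mem_ofList _ _).mp h))]
      refine List.pairwise_append.mpr ⟨ih.imp_of_mem (fun ha hb h => by rw [hkey _ ha, hkey _ hb]; exact h), List.pairwise_singleton _ _, ?_⟩
      intro a ha b hb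
      have hb' : b = y := List.mem_singleton.mp hb
      rw [hb']
      have hat : a ∈ t := (PySem.Set.mem_ofList _ _).mp ha
      have hky : pyIdxKey (t ++ [y]) y = t.length := by
        rw [pyIdxKey, PySem.List.index?_append_singleton_self t y hy]; rfl
      have hka : pyIdxKey (t ++ [y]) a < t.length := by
        rw [hkey a ha]
        obtain ⟨k, hk⟩ := (PySem.List.index?_isSome_iff (xs := t) (v := a)).mpr hat |> Option.isSome_iff_exists.mp
        obtain ⟨hlt, -, -⟩ := PySem.List.getElem_of_index?_eq_some hk
        rw [pyIdxKey, hk]; exact hlt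
      omega

-- sorting set(spks) by first-occurrence index yields the ordered dedup of spks
lemma sorted_idx_eq_ofList (xs : List String) :
    PySem.List.sorted (PySem.Set.ofList xs) (pyIdxKey xs) = PySem.Set.ofList xs :=
  PySem.List.sorted_eq_of_perm_of_pairwise_lt _ _ _ (List.Perm.refl _) (ofList_pairwise_idx xs)

-- ===== VERDICT (by name: the statement is the Claim_ definition above) =====
theorem uttToSpk_spec : Claim_equal_uttToSpk := by
  intro l _ _
  show uttToSpk l = uttToSpk_alt l
  unfold uttToSpk uttToSpk_alt
  have h0 : ((PySem.Dict.empty : PySem.Dict String String),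
      (PySem.Dict.empty : PySem.Dict String Int), (0 : Int))
      = (PySem.Dict.empty, uidFrom [], ((List.length ([] : List String) : Nat) : Int)) := rfl
  simp only []
  rw [h0, loopA l PySem.Dict.empty [] List.nodup_nil, res_zip, sorted_idx_eq_ofList]
  have hset : PySem.Set.update ([] : List String) (l.map pySpk) = PySem.Set.ofList (l.map pySpk) := by
    simp [PySem.Set.update, ← PySem.Set.ofList_eq_foldl]
  rw [hset]
  rfl
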